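-- pv_equiv track=rewrite | github.com/Kaf1018Zhang/Algorithm_Lib_Box | Algorithm_Intro_Searching_and_Sorting/Prac Questions.py | determine
-- ===== SOURCE A (Python) =====
-- def sequencial_search(list, aim):
--     for i in range(len(list)):
--         if list[i] == aim:
--             return i
--     return -1
--
-- def determine(letter_s, letter_t):
--     s_list = list(letter_s)
--     t_list = list(letter_t)
--     if len(s_list) != len(t_list):
--         return False
--     for i in range(len(s_list)-1):
--         ans = sequencial_search(t_list, s_list[i])
--         if ans == -1:
--             return False
--         s_list[i] = 0
--         t_list[ans] = 0
--     return True
-- ===== SOURCE B (Python) =====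
-- def determine(letter_s, letter_t):
--     return sorted(letter_s) == sorted(letter_t)
-- ===== Notes on version B (the rewrite author's own statement) =====
-- stated objective: faster
-- what changed: Replaced the quadratic per-character linear search with 0-overwrite marking by one sort of each string and a list-equality (anagram) check.
-- intended difference: On equal-length pairs where the first len(s)-1 characters of s form a submultiset of t but s and t are not anagrams (e.g. ('ab','aa')), A returns True because its loop skips the last character of s; B returns False, the intended anagram answer. — e.g. on determine("ab", "aa"): A returns true, B returns false
import Mathlib
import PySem

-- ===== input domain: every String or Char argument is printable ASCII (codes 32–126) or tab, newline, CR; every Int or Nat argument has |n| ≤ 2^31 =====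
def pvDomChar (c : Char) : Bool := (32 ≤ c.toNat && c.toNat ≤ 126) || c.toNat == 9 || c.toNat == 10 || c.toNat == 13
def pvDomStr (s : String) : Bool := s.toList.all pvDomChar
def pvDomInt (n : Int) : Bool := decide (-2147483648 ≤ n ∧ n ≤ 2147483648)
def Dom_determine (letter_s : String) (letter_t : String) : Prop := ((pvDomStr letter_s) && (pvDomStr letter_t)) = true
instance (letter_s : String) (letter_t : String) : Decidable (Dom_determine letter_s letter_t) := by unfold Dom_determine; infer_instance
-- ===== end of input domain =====

-- B is the plain anagram check (sort both strings once and compare), replacing A's quadratic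
-- linear-search-and-mark loop; A's loop skips the last character of s, which B fixes (see D_).

-- ===== PORT A =====
-- Python's marker 0 is ported as `none` over `Option Char`: on string inputs no character
-- equals the int 0, so `x == aim` behaves exactly as Python's `==` does here (exact on strings).
def seqSearchAux (l : List (Option Char)) (aim : Option Char) (i : Int) : Int :=
  match l with
  | [] => -1
  | x :: xs => if x == aim then i else seqSearchAux xs aim (i + 1)

def sequencialSearch (l : List (Option Char)) (aim : Option Char) : Int :=
  seqSearchAux l aim 0

def detLoop (sl tl : List (Option Char)) (i : Nat) : Nat → Bool
  | 0 => true
  | n + 1 =>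
    let ans := sequencialSearch tl (sl.getD i none)
    if ans == -1 then false
    else detLoop (sl.set i none) (tl.set ans.toNat none) (i + 1) n

def determine (letter_s : String) (letter_t : String) : Bool :=
  let sl := letter_s.toList.map some
  let tl := letter_t.toList.map some
  if sl.length ≠ tl.length then false
  else detLoop sl tl 0 (sl.length - 1)

-- ===== PORT B =====
def determine_alt (letter_s : String) (letter_t : String) : Bool :=
  PySem.List.sorted letter_s.toList (fun c => c) false
    == PySem.List.sorted letter_t.toList (fun c => c) false

-- ===== PRECONDITION & SPEC =====
-- On equal-length pairs where the first len(s)-1 characters of s form a submultiset of t but s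
-- and t are not anagrams, A returns True because its loop skips the last character of s; B
-- returns False, the intended anagram answer.
def D_determine (letter_s : String) (letter_t : String) : Prop :=
  letter_s.toList.length = letter_t.toList.length ∧
  (↑letter_s.toList.dropLast : Multiset Char) ≤ ↑letter_t.toList ∧
  (↑letter_s.toList : Multiset Char) ≠ ↑letter_t.toList
instance (letter_s : String) (letter_t : String) : Decidable (D_determine letter_s letter_t) := by
  unfold D_determine; infer_instance

def Spec_determine (letter_s : String) (letter_t : String) (out : Bool) : Prop :=
  ¬ D_determine letter_s letter_t → out = determine_alt letter_s letter_t
instance (letter_s : String) (letter_t : String) (out : Bool) : Decidable (Spec_determine letter_s letter_t out) := by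
  unfold Spec_determine; infer_instance

def pvDiffWitness_determine : String × String := ("ab", "aa")
def pvDiffWitnessOut_determine : Bool × Bool := (true, false)

-- ===== CLAIM (what is proved, stated in full; the proofs are below) =====
def Claim_unchanged_determine : Prop := ∀ (letter_s : String) (letter_t : String), Dom_determine letter_s letter_t → Spec_determine letter_s letter_t (determine letter_s letter_t)
def Claim_changed_determine : Prop := Dom_determine (pvDiffWitness_determine.1) (pvDiffWitness_determine.2) ∧ D_determine (pvDiffWitness_determine.1) (pvDiffWitness_determine.2) ∧ determine (pvDiffWitness_determine.1) (pvDiffWitness_determine.2) = pvDiffWitnessOut_determine.1 ∧ determine_alt (pvDiffWitness_determine.1) (pvDiffWitness_determine.2) = pvDiffWitnessOut_determine.2 ∧ pvDiffWitnessOut_determine.1 ≠ pvDiffWitnessOut_determine.2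
def Claim_exact_determine : Prop := ∀ (letter_s : String) (letter_t : String), Dom_determine letter_s letter_t → D_determine letter_s letter_t → determine letter_s letter_t ≠ determine_alt letter_s letter_t

-- ===== LEMMAS AND PROOFS =====

-- Reference: greedy submultiset check by repeated erase (A's loop computes exactly this).
def subMS : List Char → List Char → Bool
  | [], _ => true
  | x :: xs, t => if x ∈ t then subMS xs (t.erase x) else false

theorem seqSearchAux_eq (l : List (Option Char)) (aim : Option Char) (k : Int) :
    seqSearchAux l aim k =
      match l.findIdx? (· == aim) with
      | none => -1
      | some p => k + p := by
  induction l generalizing k with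
  | nil => simp [seqSearchAux]
  | cons x xs ih =>
    rw [List.findIdx?_cons]
    by_cases h : (x == aim) = true
    · simp [seqSearchAux, h]
    · simp only [seqSearchAux, h, Bool.false_eq_true, if_false, ih]
      cases hf : xs.findIdx? (· == aim) with
      | none => simp [hf]
      | some p =>
        simp only [Option.map_some]
        push_cast
        ring

theorem findIdx?_none_iff (l : List (Option Char)) (c : Char) :
    l.findIdx? (· == some c) = none ↔ c ∉ l.filterMap id := by
  rw [List.findIdx?_eq_none_iff]
  constructor
  · intro h hc
    obtain ⟨a, ha, hac⟩ := List.mem_filterMap.mp hc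
    have := h a ha
    simp_all
  · intro h a ha
    by_contra hb
    exact h (List.mem_filterMap.mpr ⟨a, ha, by simpa using hb⟩)

theorem set_found_erase (l : List (Option Char)) (c : Char) (p : Nat)
    (h : l.findIdx? (· == some c) = some p) :
    (l.set p none).filterMap id = (l.filterMap id).erase c := by
  induction l generalizing p with
  | nil => simp at h
  | cons x xs ih =>
    by_cases hx : x == some c
    · have hx' : x = some c := by simpa using hx
      rw [List.findIdx?_cons, if_pos hx] at h
      have hp : p = 0 := by simpa using h.symm
      subst hp; subst hx'
      simp [List.erase_cons_head]
    · rw [List.findIdx?_cons, if_neg (by simpa using hx)] at h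
      cases hf : xs.findIdx? (· == some c) with
      | none => simp [hf] at h
      | some q =>
        rw [hf] at h
        have hp : p = q + 1 := by simpa using h.symm
        subst hp
        cases x with
        | none =>
          simp only [List.set_cons_succ, List.filterMap_cons, id_eq]
          exact ih q hf
        | some d =>
          have hdc : d ≠ c := by simpa using hx
          simp only [List.set_cons_succ, List.filterMap_cons, id_eq]
          rw [List.erase_cons_tail (by simpa using hdc)]
          exact congrArg (List.cons d) (ih q hf)

theorem detLoop_eq_subMS (n : Nat) :
    ∀ (i : Nat) (sl tl : List (Option Char)) (rest : List Char),
      (sl.drop i).take n = rest.map some → rest.length = n →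
      detLoop sl tl i n = subMS rest (tl.filterMap id) := by
  induction n with
  | zero =>
    intro i sl tl rest _ hlen
    have : rest = [] := List.eq_nil_of_length_eq_zero hlen
    subst this; simp [detLoop, subMS]
  | succ n ih =>
    intro i sl tl rest htake hlen
    cases rest with
    | nil => simp at hlen
    | cons c rest' =>
      have hd : ∃ u, sl.drop i = some c :: u ∧ u.take n = rest'.map some := by
        cases hdi : sl.drop i with
        | nil => simp [hdi] at htake
        | cons z u =>
          rw [hdi] at htake
          simp only [List.take_succ_cons, List.map_cons] at htake
          exact ⟨u, by rw [List.cons.injEq] at htake; simp [htake.1], by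
            rw [List.cons.injEq] at htake; exact htake.2⟩
      obtain ⟨u, hu, hut⟩ := hd
      have hget0 : sl[i]? = some (some c) := by
        have h0 : (sl.drop i)[0]? = some (some c) := by simp [hu]
        rw [List.getElem?_drop] at h0
        simpa using h0
      have hdrop1 : sl.drop (i + 1) = u := by
        rw [← List.tail_drop, hu]; rfl
      cases hf : tl.findIdx? (· == some c) with
      | none =>
        have hnot : c ∉ tl.filterMap id := (findIdx?_none_iff tl c).mp hf
        have hrhs : subMS (c :: rest') (tl.filterMap id) = false := by
          simp only [subMS]; rw [if_neg hnot]
        rw [hrhs]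
        simp [detLoop, sequencialSearch, seqSearchAux_eq, List.getD_eq_getElem?_getD,
          hget0, hf]
      | some p =>
        have hmem : c ∈ tl.filterMap id := by
          by_contra hc
          rw [← findIdx?_none_iff tl c] at hc
          simp [hc] at hf
        have hne : ¬ ((p : Int) = -1) := by omega
        have hstep : detLoop sl tl i (n + 1)
            = detLoop (sl.set i none) (tl.set p none) (i + 1) n := by
          simp [detLoop, sequencialSearch, seqSearchAux_eq, List.getD_eq_getElem?_getD,
            hget0, hf, hne]
        have hrec := ih (i + 1) (sl.set i none) (tl.set p none) rest'
          (by
            have hslset : (sl.set i none).drop (i + 1) = sl.drop (i + 1) := by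
              rw [List.drop_set]
              simp
            rw [hslset, hdrop1]; exact hut)
          (by simpa using hlen)
        have hrhs : subMS (c :: rest') (tl.filterMap id)
            = subMS rest' ((tl.filterMap id).erase c) := by
          simp only [subMS]; rw [if_pos hmem]
        rw [hstep, hrec, set_found_erase tl c p hf, hrhs]

theorem filterMap_id_map_some (l : List Char) : (l.map some).filterMap id = l := by
  induction l with
  | nil => rfl
  | cons x xs ih => simp

theorem determine_eq_subMS (s t : String)
    (h : s.toList.length = t.toList.length) :
    determine s t = subMS s.toList.dropLast t.toList := by
  unfold determine
  simp only [List.length_map, h, ne_eq, not_true_eq_false, ite_false]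
  rw [detLoop_eq_subMS (t.toList.length - 1) 0 (s.toList.map some) (t.toList.map some)
      s.toList.dropLast
      (by rw [List.drop_zero, ← List.map_take, List.dropLast_eq_take, h])
      (by rw [List.length_dropLast, h])]
  rw [filterMap_id_map_some]

theorem subMS_iff_le (a : List Char) :
    ∀ t : List Char, subMS a t = true ↔ (↑a : Multiset Char) ≤ ↑t := by
  induction a with
  | nil => intro t; simp [subMS]
  | cons x xs ih =>
    intro t
    simp only [subMS]
    by_cases hx : x ∈ t
    · rw [if_pos hx, ih]
      have hx' : x ∈ (↑t : Multiset Char) := by simpa using hx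
      constructor
      · intro h
        have : x ::ₘ (↑xs : Multiset Char) ≤ x ::ₘ (↑t : Multiset Char).erase x := by
          rw [Multiset.cons_le_cons_iff]
          simpa [Multiset.coe_erase] using h
        rw [Multiset.cons_erase hx'] at this
        simpa using this
      · intro h
        have h' : x ::ₘ (↑xs : Multiset Char) ≤ x ::ₘ (↑t : Multiset Char).erase x := by
          rw [Multiset.cons_erase hx']
          simpa using h
        rw [Multiset.cons_le_cons_iff] at h'
        simpa [Multiset.coe_erase] using h'
    · rw [if_neg hx]
      simp only [Bool.false_eq_true, false_iff]
      intro hle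
      have : x ∈ (↑t : Multiset Char) :=
        Multiset.mem_of_le (by simpa using hle) (Multiset.mem_cons_self x ↑xs)
      exact hx (by simpa using this)

theorem determine_true_iff (s t : String) :
    determine s t = true ↔
      (s.toList.length = t.toList.length ∧
       (↑s.toList.dropLast : Multiset Char) ≤ ↑t.toList) := by
  by_cases h : s.toList.length = t.toList.length
  · rw [determine_eq_subMS s t h, subMS_iff_le]
    simp [h]
  · unfold determine
    simp only [List.length_map, ne_eq]
    rw [if_pos h]
    simp only [Bool.false_eq_true, false_iff]
    exact fun hc => h hc.1

theorem alt_true_iff (s t : String) :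
    determine_alt s t = true ↔ (↑s.toList : Multiset Char) = ↑t.toList := by
  unfold determine_alt
  rw [beq_iff_eq, Multiset.coe_eq_coe]
  constructor
  · intro h
    exact ((PySem.List.sorted_perm s.toList (fun c => c) false).symm.trans
      (h ▸ PySem.List.sorted_perm t.toList (fun c => c) false))
  · intro hp
    have h1 := PySem.List.sorted_pairwise s.toList (fun c => c)
    have h2 := PySem.List.sorted_pairwise t.toList (fun c => c)
    have hperm : (PySem.List.sorted s.toList (fun c => c) false).Perm
        (PySem.List.sorted t.toList (fun c => c) false) :=
      (PySem.List.sorted_perm s.toList (fun c => c) false).trans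
        (hp.trans (PySem.List.sorted_perm t.toList (fun c => c) false).symm)
    exact hperm.eq_of_pairwise (fun a b _ _ hab hba => le_antisymm hab hba)
      (by simpa using h1) (by simpa using h2)

theorem alt_false_of_ne (s t : String)
    (h : (↑s.toList : Multiset Char) ≠ ↑t.toList) : determine_alt s t = false := by
  cases hb : determine_alt s t with
  | false => rfl
  | true => exact absurd ((alt_true_iff s t).mp hb) h

-- ===== VERDICT (by name: the statement is the Claim_ definition above) =====
theorem determine_spec : Claim_unchanged_determine := by
  intro s t _ hnD
  by_cases heq : (↑s.toList : Multiset Char) = ↑t.toList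
  · have hlen : s.toList.length = t.toList.length := by
      simpa using congrArg Multiset.card heq
    have hsub : (↑s.toList.dropLast : Multiset Char) ≤ ↑t.toList :=
      le_trans (by exact_mod_cast (List.dropLast_sublist s.toList).subperm) (le_of_eq heq)
    rw [(determine_true_iff s t).mpr ⟨hlen, hsub⟩, (alt_true_iff s t).mpr heq]
  · have hA : determine s t = false := by
      cases hb : determine s t with
      | false => rfl
      | true =>
        obtain ⟨hlen, hsub⟩ := (determine_true_iff s t).mp hb
        exact absurd ⟨hlen, hsub, heq⟩ hnD
    rw [hA, alt_false_of_ne s t heq]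

theorem determine_changed : Claim_changed_determine := by
  unfold Claim_changed_determine; decide

theorem determine_tight : Claim_exact_determine := by
  intro s t _ hD
  obtain ⟨hlen, hsub, hne⟩ := hD
  rw [(determine_true_iff s t).mpr ⟨hlen, hsub⟩, alt_false_of_ne s t hne]
  decide
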